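-- pv_equiv track=rewrite | github.com/jeremtti/kernel_challenge | start.py | generate_mismatch_neighbors
-- ===== SOURCE A (Python) =====
-- def generate_mismatch_neighbors(kmer, m, alphabet=('A', 'C', 'G', 'T')):
--     """
--     Generate all k-mers that differ from `kmer` in at most `m` positions.
--     """
--
--     results = []
--     k_len = len(kmer)
--
--     def backtrack(prefix, idx, mismatches_used):
--         if idx == k_len:
--             results.append(prefix)
--             return
--         current_char = kmer[idx]
--         for letter in alphabet:
--             cost = (letter != current_char)
--             if mismatches_used + cost <= m:
--                 backtrack(prefix + letter, idx + 1, mismatches_used + cost)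
--
--     backtrack("", 0, 0)
--     return results
-- ===== SOURCE B (Python) =====
-- def generate_mismatch_neighbors(kmer, m, alphabet=('A', 'C', 'G', 'T')):
--     """Iterative level-by-level expansion instead of recursion."""
--     partials = [("", 0)]
--     for ch in kmer:
--         new_partials = []
--         for prefix, used in partials:
--             for letter in alphabet:
--                 cost = (letter != ch)
--                 if used + cost <= m:
--                     new_partials.append((prefix + letter, used + cost))
--         partials = new_partials
--     return [prefix for prefix, _ in partials]
-- ===== Notes on version B (the rewrite author's own statement) =====
-- stated objective: alternative
-- what changed: Replaced the recursive backtracking with an iterative level-by-level worklist expansion over the positions of kmer, carrying (prefix, mismatches) pairs; same asymptotic cost, no recursion.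
import Mathlib
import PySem

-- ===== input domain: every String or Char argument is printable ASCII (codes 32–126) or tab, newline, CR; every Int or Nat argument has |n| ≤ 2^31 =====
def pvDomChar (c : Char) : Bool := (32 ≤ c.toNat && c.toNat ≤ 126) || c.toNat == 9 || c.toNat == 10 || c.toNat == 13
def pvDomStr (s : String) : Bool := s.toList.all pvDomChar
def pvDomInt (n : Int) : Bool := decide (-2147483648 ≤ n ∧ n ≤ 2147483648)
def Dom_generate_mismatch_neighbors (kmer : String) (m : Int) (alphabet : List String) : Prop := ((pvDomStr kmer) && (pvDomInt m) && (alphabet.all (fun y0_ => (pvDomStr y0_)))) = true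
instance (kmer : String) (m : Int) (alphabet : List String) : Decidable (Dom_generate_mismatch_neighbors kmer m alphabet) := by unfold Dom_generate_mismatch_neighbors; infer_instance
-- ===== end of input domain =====

-- B replaces A's recursive backtracking by an iterative level-by-level worklist expansion (alternative decomposition, same cost); return values proved equal on all inputs.
-- ===== PORT A =====
-- backtrack(prefix, idx, mismatches_used): recursion on the remaining characters of kmer;
-- the for-loop appending into `results` is the flatMap over alphabet (empty list where no branch is taken).
def pvBacktrackA (m : Int) (alphabet : List String) : List Char → String → Int → List String
  | [], pref, _ => [pref]
  | c :: cs, pref, used =>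
      alphabet.flatMap (fun letter =>
        let cost : Int := if letter ≠ c.toString then 1 else 0
        if used + cost ≤ m then pvBacktrackA m alphabet cs (pref ++ letter) (used + cost) else [])
termination_by rest => rest.length
decreasing_by simp

def generate_mismatch_neighbors (kmer : String) (m : Int) (alphabet : List String) : List String :=
  pvBacktrackA m alphabet kmer.toList "" 0

-- ===== PORT B =====
-- one level of the worklist expansion: extend every (prefix, used) by every admissible letter
def pvStepB (m : Int) (alphabet : List String) (partials : List (String × Int)) (c : Char) : List (String × Int) :=
  partials.flatMap (fun pu =>
    alphabet.filterMap (fun letter =>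
      let cost : Int := if letter ≠ c.toString then 1 else 0
      if pu.2 + cost ≤ m then some (pu.1 ++ letter, pu.2 + cost) else none))

def generate_mismatch_neighbors_alt (kmer : String) (m : Int) (alphabet : List String) : List String :=
  (kmer.toList.foldl (pvStepB m alphabet) [("", 0)]).map Prod.fst

-- ===== PRECONDITION & SPEC =====
def Spec_generate_mismatch_neighbors (kmer : String) (m : Int) (alphabet : List String) (out : List String) : Prop := out = generate_mismatch_neighbors_alt kmer m alphabet
instance (kmer : String) (m : Int) (alphabet : List String) (out : List String) : Decidable (Spec_generate_mismatch_neighbors kmer m alphabet out) := by unfold Spec_generate_mismatch_neighbors; infer_instance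

-- ===== CLAIM (what is proved, stated in full; the proofs are below) =====
def Claim_equal_generate_mismatch_neighbors : Prop := ∀ (kmer : String) (m : Int) (alphabet : List String), Dom_generate_mismatch_neighbors kmer m alphabet → Spec_generate_mismatch_neighbors kmer m alphabet (generate_mismatch_neighbors kmer m alphabet)

-- ===== LEMMAS AND PROOFS =====

-- flatMap after filterMap, pointwise: keep the some-branch, drop the none-branch
theorem pvFilterFlat {A B C : Type} (l : List A) (f : A → Option B) (g : B → List C) :
    (l.filterMap f).flatMap g = l.flatMap (fun a => ((f a).map g).getD []) := by
  induction l with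
  | nil => simp
  | cons a as ih =>
      cases h : f a <;> simp [h, ih]

-- one alphabet pass: the DFS's conditional recursion equals filterMap-then-flatMap
theorem pvInner (m : Int) (alphabet : List String) (cs : List Char) (c : Char) (p : String) (u : Int) :
    pvBacktrackA m alphabet (c :: cs) p u
      = (alphabet.filterMap (fun letter =>
          let cost : Int := if letter ≠ c.toString then 1 else 0
          if u + cost ≤ m then some (p ++ letter, u + cost) else none)).flatMap
        (fun pu => pvBacktrackA m alphabet cs pu.1 pu.2) := by
  rw [pvBacktrackA, pvFilterFlat]
  refine List.flatMap_congr (fun letter _ => ?_)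
  dsimp only
  split <;> split <;> rfl

-- loop invariant: mapping fst over the folded worklist yields the concatenated DFS results
theorem pvInv (m : Int) (alphabet : List String) (rest : List Char) :
    ∀ partials : List (String × Int),
      (rest.foldl (pvStepB m alphabet) partials).map Prod.fst
        = partials.flatMap (fun pu => pvBacktrackA m alphabet rest pu.1 pu.2) := by
  induction rest with
  | nil =>
      intro partials
      simp only [List.foldl_nil, pvBacktrackA]
      induction partials with
      | nil => rfl
      | cons q qs ihq => simp [ihq]
  | cons c cs ih =>
      intro partials
      rw [List.foldl_cons, ih]
      simp only [pvStepB, List.flatMap_assoc]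
      exact (List.flatMap_congr (fun pu _ => pvInner m alphabet cs c pu.1 pu.2)).symm

-- ===== VERDICT (by name: the statement is the Claim_ definition above) =====
theorem generate_mismatch_neighbors_spec : Claim_equal_generate_mismatch_neighbors := by
  intro kmer m alphabet _
  unfold Spec_generate_mismatch_neighbors generate_mismatch_neighbors generate_mismatch_neighbors_alt
  rw [pvInv]
  simp
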